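-- pv_equiv track=rewrite | github.com/rapveen/Interviews_09_24 | stripe/coding_R1/MinimumPenalty.py | find_minimum_loss_day
-- ===== SOURCE A (Python) =====
-- def find_minimum_loss_day(S):
--     # Remove spaces from the input string
--     S = S.replace(' ', '')
--
--     # Initialize counters
--     loss_before = 0
--     loss_after = S.count('Y')  # Total number of 'Y's in the string
--     min_loss = float('inf')
--     best_day = -1
--
--     # Iterate through each day
--     for i in range(len(S)):
--         # Calculate total loss if closing on day i
--         total_loss = loss_before + loss_after
--
--         # Update minimum loss and best day
--         if total_loss < min_loss:
--             min_loss = total_loss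
--             best_day = i
--
--         # Update loss_before and loss_after for the next iteration
--         if S[i] == 'N':
--             loss_before += 1
--         elif S[i] == 'Y':
--             loss_after -= 1
--
--     return min_loss
-- ===== SOURCE B (Python) =====
-- def find_minimum_loss_day(S):
--     # Remove spaces from the input string
--     s = S.replace(' ', '')
--     n = len(s)
--     # suffix table: sufY[i] = number of 'Y' in s[i:]
--     sufY = [0] * (n + 1)
--     for i in range(n - 1, -1, -1):
--         sufY[i] = sufY[i + 1] + (s[i] == 'Y')
--     # prefix table: prefN[i] = number of 'N' in s[:i]
--     prefN = [0] * (n + 1)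
--     for i in range(n):
--         prefN[i + 1] = prefN[i] + (s[i] == 'N')
--     # penalty for closing on day i is prefN[i] + sufY[i]; take the minimum
--     return min((p + y for p, y in zip(prefN[:-1], sufY)), default=float('inf'))
-- ===== Notes on version B (the rewrite author's own statement) =====
-- stated objective: alternative
-- what changed: Replaces A's single pass with incremental running counters and best-so-far tracking by building explicit prefix-N and suffix-Y tables and reducing them with one min() over their zip.
-- outside the precondition, e.g. on find_minimum_loss_day('  '): A returns inf, B returns inf
import Mathlib
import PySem

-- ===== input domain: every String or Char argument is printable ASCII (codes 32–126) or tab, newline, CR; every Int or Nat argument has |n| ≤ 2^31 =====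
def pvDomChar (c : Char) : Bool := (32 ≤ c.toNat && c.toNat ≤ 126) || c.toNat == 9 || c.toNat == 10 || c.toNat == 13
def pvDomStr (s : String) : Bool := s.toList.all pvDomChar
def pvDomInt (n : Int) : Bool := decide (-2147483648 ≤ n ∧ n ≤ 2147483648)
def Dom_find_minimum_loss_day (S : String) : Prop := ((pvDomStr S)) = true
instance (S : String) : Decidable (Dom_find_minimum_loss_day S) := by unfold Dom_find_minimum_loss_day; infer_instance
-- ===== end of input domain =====

-- B rebuilds A's running-counter scan as explicit prefix/suffix tables plus one min-reduction (objective: alternative, same cost).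
-- ===== PORT A =====
-- the for-loop of A: state (i, loss_before, loss_after, min_loss, best_day); min_loss none = Python's float infinity
def pvLoopA : List Char → Int → Int → Int → Option Int → Int → Option Int
  | [], _, _, _, ml, _ => ml
  | c :: rest, i, lb, la, ml, bd =>
    let total := lb + la
    let hit : Bool := match ml with | none => true | some m => decide (total < m)  -- total_loss < min_loss (infinite at start)
    let ml' := if hit then some total else ml
    let bd' := if hit then i else bd
    let lb' := if c = 'N' then lb + 1 else lb
    let la' := if c = 'N' then la else if c = 'Y' then la - 1 else la
    pvLoopA rest (i + 1) lb' la' ml' bd'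

def find_minimum_loss_day (S : String) : Int :=
  let s := PySem.Chars.replace S.toList [' '] []          -- S.replace(' ', '')
  match pvLoopA s 0 0 ((PySem.Chars.count s ['Y'] : Int)) none (-1) with
  | some v => v
  | none => 0   -- here Python A returns float infinity (only when s is empty); such inputs are outside Pre_

-- ===== PORT B =====
-- backward fill sufY[i] = sufY[i+1] + (s[i]=='Y'); result list has length n+1, last entry 0
def pvSufY : List Char → List Int
  | [] => [0]
  | c :: r =>
    let t := pvSufY r
    ((if c = 'Y' then 1 else 0) + t.headD 0) :: t

-- forward fill prefN[i+1] = prefN[i] + (s[i]=='N'); accumulator a = prefN[i]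
def pvPrefN : Int → List Char → List Int
  | a, [] => [a]
  | a, c :: r => a :: pvPrefN (a + (if c = 'N' then 1 else 0)) r

def find_minimum_loss_day_alt (S : String) : Int :=
  let s := PySem.Chars.replace S.toList [' '] []          -- S.replace(' ', '')
  let totals := ((pvPrefN 0 s).dropLast.zip (pvSufY s)).map (fun p => p.1 + p.2)  -- zip(prefN[:-1], sufY)
  match totals.foldl (fun acc t => some (match acc with | none => t | some m => min m t)) none with
  | some v => v
  | none => 0   -- min's default, float infinity in Source B; such inputs are outside Pre_

-- ===== PRECONDITION & SPEC =====
-- Pre_ excludes strings consisting only of spaces, on which A returns float infinity — not an int value.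
def Pre_find_minimum_loss_day (S : String) : Prop := S.toList.any (· ≠ ' ') = true
instance (S : String) : Decidable (Pre_find_minimum_loss_day S) := by unfold Pre_find_minimum_loss_day; infer_instance
def pvWitness_find_minimum_loss_day : String := "N YN"

def Spec_find_minimum_loss_day (S : String) (out : Int) : Prop := out = find_minimum_loss_day_alt S
instance (S : String) (out : Int) : Decidable (Spec_find_minimum_loss_day S out) := by unfold Spec_find_minimum_loss_day; infer_instance

-- ===== CLAIM (what is proved, stated in full; the proofs are below) =====
def Claim_equal_find_minimum_loss_day : Prop := ∀ (S : String), Dom_find_minimum_loss_day S → Pre_find_minimum_loss_day S → Spec_find_minimum_loss_day S (find_minimum_loss_day S)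

-- ===== LEMMAS AND PROOFS =====

-- the option-min combining step, shared shape of both reductions
def pvOmin (acc : Option Int) (t : Int) : Option Int :=
  some (match acc with | none => t | some m => min m t)

-- list of penalties (pn_i + #Y in s[i:]) for all days i, pn = #N seen so far
def pvT : Int → List Char → List Int
  | _, [] => []
  | pn, c :: r => (pn + ((c :: r).count 'Y' : Int)) :: pvT (pn + (if c = 'N' then 1 else 0)) r

lemma pvCount_go_Y (fuel : Nat) : ∀ (l : List Char) (acc : Nat), l.length ≤ fuel →
    PySem.Chars.count.go ['Y'] fuel l acc = acc + l.count 'Y' := by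
  induction fuel with
  | zero => intro l acc h; cases l with
    | nil => simp [PySem.Chars.count.go]
    | cons c r => simp at h
  | succ n ih => intro l acc h; cases l with
    | nil => simp [PySem.Chars.count.go]
    | cons c r =>
      simp only [PySem.Chars.count.go, List.isPrefixOf, List.count_cons]
      by_cases hc : c = 'Y'
      · simp [hc, ih r (acc + 1) (by simpa using h)]
        omega
      · simp [hc, Ne.symm hc, ih r acc (by simpa using h)]

lemma pvCountY (s : List Char) : PySem.Chars.count s ['Y'] = s.count 'Y' := by
  simp [PySem.Chars.count, pvCount_go_Y s.length s 0 le_rfl]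

lemma pvLoopA_eq (l : List Char) : ∀ (i lb : Int) (ml : Option Int) (bd : Int),
    pvLoopA l i lb ((l.count 'Y' : Int)) ml bd = (pvT lb l).foldl pvOmin ml := by
  induction l with
  | nil => intro i lb ml bd; simp [pvLoopA, pvT]
  | cons c r ih =>
    intro i lb ml bd
    simp only [pvLoopA, pvT, List.foldl_cons]
    have hla : (if c = 'N' then ((c :: r).count 'Y' : Int)
        else if c = 'Y' then ((c :: r).count 'Y' : Int) - 1 else ((c :: r).count 'Y' : Int))
        = ((r.count 'Y' : Nat) : Int) := by
      by_cases hc : c = 'Y'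
      · simp [hc]
      · by_cases hn : c = 'N' <;> simp [hc, hn]
    have hml : (if (match ml with | none => true | some m => decide (lb + ((c :: r).count 'Y' : Int) < m))
        then some (lb + ((c :: r).count 'Y' : Int)) else ml)
        = pvOmin ml (lb + ((c :: r).count 'Y' : Int)) := by
      cases ml with
      | none => simp [pvOmin]
      | some m =>
        simp only [pvOmin]
        rw [min_def]
        split_ifs <;> simp_all <;> omega
    have hlb : (if c = 'N' then lb + 1 else lb) = lb + (if c = 'N' then (1:Int) else 0) := by
      split_ifs <;> ring
    rw [hla, hml, hlb, ih]

lemma pvSufY_headD (l : List Char) : (pvSufY l).headD 0 = ((l.count 'Y' : Nat) : Int) := by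
  induction l with
  | nil => simp [pvSufY]
  | cons c r ih =>
    simp only [pvSufY, List.headD_cons, ih, List.count_cons]
    by_cases hc : c = 'Y' <;> simp [hc] <;> ring

lemma pvPrefN_ne_nil (a : Int) (l : List Char) : pvPrefN a l ≠ [] := by
  cases l <;> simp [pvPrefN]

lemma pvZip_eq (l : List Char) : ∀ (pn : Int),
    ((pvPrefN pn l).dropLast.zip (pvSufY l)).map (fun p => p.1 + p.2) = pvT pn l := by
  induction l with
  | nil => intro pn; simp [pvPrefN, pvSufY, pvT]
  | cons c r ih =>
    intro pn
    rw [show pvPrefN pn (c :: r) = pn :: pvPrefN (pn + (if c = 'N' then 1 else 0)) r from rfl,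
        List.dropLast_cons_of_ne_nil (pvPrefN_ne_nil _ r)]
    simp only [pvSufY, pvT, List.zip_cons_cons, List.map_cons, ih]
    congr 1
    rw [pvSufY_headD, List.count_cons]
    by_cases hc : c = 'Y' <;> simp [hc] <;> ring

-- ===== VERDICT (by name: the statement is the Claim_ definition above) =====
theorem find_minimum_loss_day_spec : Claim_equal_find_minimum_loss_day := by
  intro S _ _
  unfold Spec_find_minimum_loss_day find_minimum_loss_day find_minimum_loss_day_alt
  simp only [pvCountY, pvLoopA_eq, pvZip_eq]
  rfl
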